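-- pv_equiv track=rewrite | github.com/calinstapinu/Fp | lab 2/lab 2 probleme.py | secventa_maxima
-- ===== SOURCE A (Python) =====
-- def domino(numar1, numar2):
--     return numar1 % 10 == numar2 // 10 or numar1 // 10 == numar2 %10
--
-- def secventa_maxima(numere):
--     max_l = 1
--     max_start_ind = 0
--     current_l = 1
--     current_ind = 0
--
--     for i in range(1, len(numere)):
--         if domino(numere[i - 1], numere[i]):
--             current_l += 1
--         else:
--             if current_l > max_l:
--                 max_l = current_l
--                 max_start_ind = current_ind
--             current_l = 1
--             current_ind = i
--
--     if current_l > max_l: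
--         max_l = current_l
--         max_start_ind = current_ind
--
--     if max_l > 1:
--         return numere[max_start_ind:max_start_ind + max_l]
--     else:
--         return None
-- ===== SOURCE B (Python) =====
-- def domino(numar1, numar2):
--     return numar1 % 10 == numar2 // 10 or numar1 // 10 == numar2 % 10
--
--
-- def secventa_maxima(numere):
--     # Pass 1: collect all maximal domino-chains as (start, length) pairs.
--     n = len(numere)
--     segments = []
--     start = 0
--     for i in range(1, n + 1):
--         if i == n or not domino(numere[i - 1], numere[i]):
--             segments.append((start, i - start))
--             start = i
--     # Pass 2: pick the first segment of maximal length.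
--     best = None
--     for s, l in segments:
--         if best is None or l > best[1]:
--             best = (s, l)
--     if best is not None and best[1] > 1:
--         return numere[best[0]:best[0] + best[1]]
--     return None
-- ===== Notes on version B (the rewrite author's own statement) =====
-- stated objective: alternative
-- what changed: Instead of A's inline running-maximum state machine, B first materialises every maximal domino-chain as a (start, length) segment in one pass, then picks the first longest segment in a second pass.
import Mathlib
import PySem

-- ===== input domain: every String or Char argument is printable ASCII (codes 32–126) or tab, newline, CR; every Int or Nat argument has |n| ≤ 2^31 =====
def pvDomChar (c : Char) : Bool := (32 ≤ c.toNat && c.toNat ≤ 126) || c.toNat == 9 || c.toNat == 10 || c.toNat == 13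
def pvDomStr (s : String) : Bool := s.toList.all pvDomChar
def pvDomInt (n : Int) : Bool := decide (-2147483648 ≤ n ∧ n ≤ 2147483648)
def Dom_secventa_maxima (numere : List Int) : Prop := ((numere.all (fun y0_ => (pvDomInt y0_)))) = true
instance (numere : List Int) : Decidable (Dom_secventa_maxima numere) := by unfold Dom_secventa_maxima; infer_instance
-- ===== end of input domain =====

-- B replaces A's inline running-maximum state machine by two passes: collect all maximal
-- domino-chain segments, then pick the first longest (objective: alternative decomposition).

-- ===== PORT A =====
def dominoFn (numar1 numar2 : Int) : Bool :=
  (PySem.Int.mod numar1 10 == PySem.Int.floordiv numar2 10) ||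
  (PySem.Int.floordiv numar1 10 == PySem.Int.mod numar2 10)

-- the loop body of A; numere[i-1]/numere[i] are always in range for i ∈ range(1, len),
-- so pyGetD with default 0 is exact here
def stepA (numere : List Int) (s : Int × Int × Int × Int) (i : Int) : Int × Int × Int × Int :=
  let (max_l, max_start, cur_l, cur_ind) := s
  if dominoFn (PySem.List.pyGetD numere (i - 1) 0) (PySem.List.pyGetD numere i 0) then
    (max_l, max_start, cur_l + 1, cur_ind)
  else if cur_l > max_l then (cur_l, cur_ind, 1, i) else (max_l, max_start, 1, i)

def secventa_maxima (numere : List Int) : Option (List Int) :=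
  let st := (PySem.List.pyRange 1 (numere.length : Int) 1).foldl (stepA numere) (1, 0, 1, 0)
  let fin := if st.2.2.1 > st.1 then (st.2.2.1, st.2.2.2) else (st.1, st.2.1)
  if fin.1 > 1 then some (PySem.List.slice numere (some fin.2) (some (fin.2 + fin.1))) else none

-- ===== PORT B =====
-- the segment-collecting loop body of B; when i = len the `i == n` disjunct holds and the
-- (out-of-range) domino value is ignored, matching Python's short-circuit `or`
def stepB (numere : List Int) (s : List (Int × Int) × Int) (i : Int) : List (Int × Int) × Int :=
  let (segs, start) := s
  if i == (numere.length : Int) ||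
     !(dominoFn (PySem.List.pyGetD numere (i - 1) 0) (PySem.List.pyGetD numere i 0)) then
    (segs ++ [(start, i - start)], i)
  else (segs, start)

-- the best-picking loop body of B
def bestStep (b : Option (Int × Int)) (sl : Int × Int) : Option (Int × Int) :=
  match b with
  | none => some sl
  | some (s, l) => if sl.2 > l then some sl else some (s, l)

def secventa_maxima_alt (numere : List Int) : Option (List Int) :=
  let segs := ((PySem.List.pyRange 1 ((numere.length : Int) + 1) 1).foldl (stepB numere) ([], 0)).1
  match segs.foldl bestStep none with
  | some (s, l) => if l > 1 then some (PySem.List.slice numere (some s) (some (s + l))) else none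
  | none => none

-- ===== PRECONDITION & SPEC =====
def Spec_secventa_maxima (numere : List Int) (out : Option (List Int)) : Prop := out = secventa_maxima_alt numere
instance (numere : List Int) (out : Option (List Int)) : Decidable (Spec_secventa_maxima numere out) := by unfold Spec_secventa_maxima; infer_instance

-- ===== CLAIM (what is proved, stated in full; the proofs are below) =====
def Claim_equal_secventa_maxima : Prop := ∀ (numere : List Int), Dom_secventa_maxima numere → Spec_secventa_maxima numere (secventa_maxima numere)

-- ===== LEMMAS AND PROOFS =====

-- A's way of folding the running maximum over closed segments
def maxStep (p : Int × Int) (sl : Int × Int) : Int × Int :=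
  if sl.2 > p.1 then (sl.2, sl.1) else p

lemma bestStep_swap (t : List (Int × Int)) : ∀ (bs bl : Int),
    t.foldl bestStep (some (bs, bl)) =
      some ((t.foldl maxStep (bl, bs)).2, (t.foldl maxStep (bl, bs)).1) := by
  induction t with
  | nil => intro bs bl; rfl
  | cons hd tl ih =>
    intro bs bl
    simp only [List.foldl_cons, bestStep, maxStep]
    by_cases h : hd.2 > bl
    · simp [h, ih]
    · simp [h, ih]

lemma head_absorb (t : List (Int × Int)) (l₀ : Int) (h : 1 ≤ l₀) :
    ((0, l₀) :: t).foldl maxStep (1, 0) = t.foldl maxStep (l₀, 0) := by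
  simp only [List.foldl_cons, maxStep]
  rcases lt_or_eq_of_le h with h1 | h1
  · simp [h1]
  · simp [← h1]

-- loop invariant relating A's state and B's state after processing indices 1..k-1
lemma inv_lemma (numere : List Int) : ∀ (k : Nat), 1 ≤ k → k ≤ numere.length →
    (((PySem.List.pyRange 1 (k : Int) 1).foldl (stepA numere) (1, 0, 1, 0)).2.2.2 =
        ((PySem.List.pyRange 1 (k : Int) 1).foldl (stepB numere) ([], 0)).2) ∧
    (((PySem.List.pyRange 1 (k : Int) 1).foldl (stepA numere) (1, 0, 1, 0)).2.2.1 =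
        (k : Int) - ((PySem.List.pyRange 1 (k : Int) 1).foldl (stepB numere) ([], 0)).2) ∧
    (0 ≤ ((PySem.List.pyRange 1 (k : Int) 1).foldl (stepB numere) ([], 0)).2) ∧
    (((PySem.List.pyRange 1 (k : Int) 1).foldl (stepB numere) ([], 0)).2 < (k : Int)) ∧
    ((((PySem.List.pyRange 1 (k : Int) 1).foldl (stepA numere) (1, 0, 1, 0)).1,
      ((PySem.List.pyRange 1 (k : Int) 1).foldl (stepA numere) (1, 0, 1, 0)).2.1) =
        (((PySem.List.pyRange 1 (k : Int) 1).foldl (stepB numere) ([], 0)).1).foldl maxStep (1, 0)) ∧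
    ((((PySem.List.pyRange 1 (k : Int) 1).foldl (stepB numere) ([], 0)).1 = [] ∧
        ((PySem.List.pyRange 1 (k : Int) 1).foldl (stepB numere) ([], 0)).2 = 0) ∨
      (∃ l₀ t, ((PySem.List.pyRange 1 (k : Int) 1).foldl (stepB numere) ([], 0)).1 = (0, l₀) :: t ∧ 1 ≤ l₀)) := by
  intro k
  induction k with
  | zero => intro h; omega
  | succ k ih =>
    intro _ hkn
    by_cases hk1 : 1 ≤ k
    · have hrange : PySem.List.pyRange 1 ((k : Int) + 1) 1 =
          PySem.List.pyRange 1 (k : Int) 1 ++ [(k : Int)] :=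
        PySem.List.pyRange_one_succ_right (by exact_mod_cast hk1)
      have hlt : (k : Int) < (numere.length : Int) := by exact_mod_cast hkn
      obtain ⟨h1, h2, h3, h4, h5, h6⟩ := ih hk1 (by omega)
      push_cast
      rw [hrange]
      simp only [List.foldl_append, List.foldl_cons, List.foldl_nil]
      set a := (PySem.List.pyRange 1 (k : Int) 1).foldl (stepA numere) (1, 0, 1, 0) with ha
      set b := (PySem.List.pyRange 1 (k : Int) 1).foldl (stepB numere) ([], 0) with hb
      have hne : ((k : Int) == (numere.length : Int)) = false := by
        simp; omega
      by_cases hc : dominoFn (PySem.List.pyGetD numere ((k : Int) - 1) 0)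
          (PySem.List.pyGetD numere (k : Int) 0)
      all_goals simp only [Bool.not_eq_true] at hc
      all_goals simp at hc
      · -- domino matches: A extends the current run, B keeps its state
        have hsB : stepB numere b (k : Int) = b := by
          simp [stepB, hne, hc]
        have hsA : stepA numere a (k : Int) = (a.1, a.2.1, a.2.2.1 + 1, a.2.2.2) := by
          simp [stepA, hc]
        rw [hsA, hsB]
        dsimp only
        exact ⟨h1, by omega, h3, by omega, h5, h6⟩
      · -- segment closes at index k
        have hsB : stepB numere b (k : Int) = (b.1 ++ [(b.2, (k : Int) - b.2)], (k : Int)) := by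
          simp [stepB, hne, hc]
        rw [hsB]
        have hmax : (b.1 ++ [(b.2, (k : Int) - b.2)]).foldl maxStep (1, 0) =
            (if a.2.2.1 > a.1 then (a.2.2.1, a.2.2.2) else (a.1, a.2.1)) := by
          rw [List.foldl_append, ← h5, List.foldl_cons, List.foldl_nil, maxStep]
          rw [h1, h2]
        have hSeg : (b.1 ++ [(b.2, (k : Int) - b.2)] = [] ∧ (k : Int) = 0) ∨
            (∃ l₀ t, b.1 ++ [(b.2, (k : Int) - b.2)] = (0, l₀) :: t ∧ 1 ≤ l₀) := by
          rcases h6 with ⟨hnil, hz⟩ | ⟨l₀, t, hseg, hl₀⟩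
          · right
            refine ⟨(k : Int), [], ?_, by exact_mod_cast hk1⟩
            rw [hnil, hz]; simp
          · right; exact ⟨l₀, t ++ [(b.2, (k : Int) - b.2)], by rw [hseg]; simp, hl₀⟩
        by_cases hgt : a.2.2.1 > a.1
        · have hsA : stepA numere a (k : Int) = (a.2.2.1, a.2.2.2, 1, (k : Int)) := by
            simp [stepA, hc, hgt]
          rw [hsA]
          dsimp only
          refine ⟨rfl, by omega, by omega, by omega, ?_, hSeg⟩
          rw [hmax]; simp [hgt]
        · have hsA : stepA numere a (k : Int) = (a.1, a.2.1, 1, (k : Int)) := by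
            simp [stepA, hc, hgt]
          rw [hsA]
          dsimp only
          refine ⟨rfl, by omega, by omega, by omega, ?_, hSeg⟩
          rw [hmax]; simp [hgt]
    · -- k = 0, so succ k = 1: both folds run over the empty range
      have hk0 : k = 0 := by omega
      subst hk0
      have hnil : PySem.List.pyRange 1 (1 : Int) 1 = [] := PySem.List.pyRange_one_eq_nil (by omega)
      norm_num [hnil]

-- ===== VERDICT (by name: the statement is the Claim_ definition above) =====
theorem secventa_maxima_spec : Claim_equal_secventa_maxima := by
  intro numere _
  unfold Spec_secventa_maxima secventa_maxima secventa_maxima_alt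
  rcases Nat.eq_zero_or_pos numere.length with h0 | hpos
  · -- empty list: both sides are none
    have : numere = [] := List.length_eq_zero_iff.mp h0
    subst this; rfl
  · obtain ⟨h1, h2, h3, h4, h5, h6⟩ := inv_lemma numere numere.length hpos le_rfl
    set n : Int := (numere.length : Int) with hn
    set a := (PySem.List.pyRange 1 n 1).foldl (stepA numere) (1, 0, 1, 0) with ha
    set b := (PySem.List.pyRange 1 n 1).foldl (stepB numere) ([], 0) with hb
    have hpos' : (1 : Int) ≤ n := by omega
    have hrange : PySem.List.pyRange 1 (n + 1) 1 = PySem.List.pyRange 1 n 1 ++ [n] :=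
      PySem.List.pyRange_one_succ_right hpos'
    rw [hrange]
    simp only [List.foldl_append, List.foldl_cons, List.foldl_nil, ← hb]
    have hBlast : stepB numere b n = (b.1 ++ [(b.2, n - b.2)], n) := by
      simp [stepB, hn]
    rw [hBlast]
    have hsegf : ∃ l₀ t, b.1 ++ [(b.2, n - b.2)] = (0, l₀) :: t ∧ 1 ≤ l₀ := by
      rcases h6 with ⟨hnil, hz⟩ | ⟨l₀, t, hseg, hl₀⟩
      · refine ⟨n, [], ?_, by omega⟩
        rw [hnil, hz]; simp
      · exact ⟨l₀, t ++ [(b.2, n - b.2)], by rw [hseg]; simp, hl₀⟩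
    obtain ⟨l₀, t, hseg, hl₀⟩ := hsegf
    have hfinA : (if a.2.2.1 > a.1 then (a.2.2.1, a.2.2.2) else (a.1, a.2.1)) =
        t.foldl maxStep (l₀, 0) := by
      rw [← head_absorb t l₀ hl₀, ← hseg, List.foldl_append, ← h5,
        List.foldl_cons, List.foldl_nil, maxStep, h1, h2]
    rw [hseg, hfinA, List.foldl_cons]
    have hb0 : bestStep none (0, l₀) = some (0, l₀) := rfl
    rw [hb0, bestStep_swap t 0 l₀]
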